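-- pv_equiv track=rewrite | github.com/SecurityAnalysts/samson | samson/math/general.py | fast_mul
-- ===== SOURCE A (Python) =====
-- def fast_mul(a: int, b: int, s: int=None) -> int:
--     """
--     Computes `s = a * b` over arbitrary rings.
--
--     Parameters:
--         a (int): Element `a`.
--         b (int): Multiplier.
--         s (int): The 'zero' value of the ring.
--
--     Returns:
--         int: `a * b` within its ring.
--
--     Examples:
--         >>> from samson.math.general import fast_mul
--         >>> fast_mul(5, 12, 0)
--         60
--
--         >>> from samson.math.algebra.all import ZZ
--         >>> from samson.math.symbols import Symbol
--         >>> x = Symbol('x')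
--         >>> P = (ZZ/ZZ(127))[x]
--         >>> fast_mul(P(x+5), 5)
--         <Polynomial: 5*x + 25, coeff_ring=ZZ/ZZ(127)>
--
--     """
--     s = s if s is not None else a.ring.zero
--     if b < 0:
--         b = -b
--         a = -a
--
--     while b != 0:
--         if b & 1:
--             s = (s + a)
--         b >>= 1
--         a = (a + a)
--     return s
-- ===== SOURCE B (Python) =====
-- def fast_mul(a: int, b: int, s: int=None) -> int:
--     # Over the integers, ring double-and-add is just multiplication.
--     if s is None:
--         s = 0
--     return s + a * b
-- ===== Notes on version B (the rewrite author's own statement) =====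
-- stated objective: simpler
-- what changed: Replaces the double-and-add loop (sign normalization, bit-scanning, repeated doubling) with the closed form s + a * b, valid because the arguments are plain integers.
import Mathlib
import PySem

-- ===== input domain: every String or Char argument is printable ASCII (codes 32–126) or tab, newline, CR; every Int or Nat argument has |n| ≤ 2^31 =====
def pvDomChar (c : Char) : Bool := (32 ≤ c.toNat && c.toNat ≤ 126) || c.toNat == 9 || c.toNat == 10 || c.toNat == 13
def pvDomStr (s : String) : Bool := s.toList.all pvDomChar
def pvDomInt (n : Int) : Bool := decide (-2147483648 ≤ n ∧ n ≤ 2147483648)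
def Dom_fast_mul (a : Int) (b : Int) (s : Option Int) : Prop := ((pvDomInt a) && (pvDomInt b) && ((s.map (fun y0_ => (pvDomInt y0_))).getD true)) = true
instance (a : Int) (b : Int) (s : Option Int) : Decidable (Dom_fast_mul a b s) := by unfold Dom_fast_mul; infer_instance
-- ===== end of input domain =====

-- B replaces A's bit-scanning double-and-add loop with the closed form s + a * b,
-- exact for integer arguments ("simpler").

-- ===== PORT A =====
-- A's while loop; after the sign normalization b ≥ 0, so the loop counter is a Nat.
def fastMulLoopA (s a : Int) (b : Nat) : Int :=
  if b = 0 then s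
  else fastMulLoopA (if b % 2 = 1 then s + a else s) (a + a) (b / 2)
decreasing_by exact Nat.div_lt_self (Nat.pos_of_ne_zero (by assumption)) (by norm_num)

-- s = none makes Python A raise AttributeError (an int has no .ring); excluded by Pre_,
-- so the default 0 below is never relied upon.
def fast_mul (a : Int) (b : Int) (s : Option Int) : Int :=
  let s0 := s.getD 0
  let p : Int × Int := if b < 0 then (-a, -b) else (a, b)
  fastMulLoopA s0 p.1 p.2.toNat

-- ===== PORT B =====
def fast_mul_alt (a : Int) (b : Int) (s : Option Int) : Int :=
  s.getD 0 + a * b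

-- ===== PRECONDITION & SPEC =====
-- Pre_ excludes exactly s = None, on which Python A raises AttributeError (a.ring on an int).
def Pre_fast_mul (a : Int) (b : Int) (s : Option Int) : Prop := s.isSome = true
instance (a : Int) (b : Int) (s : Option Int) : Decidable (Pre_fast_mul a b s) := by unfold Pre_fast_mul; infer_instance
def pvWitness_fast_mul : Int × Int × Option Int := (5, 12, some 0)

def Spec_fast_mul (a : Int) (b : Int) (s : Option Int) (out : Int) : Prop := out = fast_mul_alt a b s
instance (a : Int) (b : Int) (s : Option Int) (out : Int) : Decidable (Spec_fast_mul a b s out) := by unfold Spec_fast_mul; infer_instance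

-- ===== CLAIM (what is proved, stated in full; the proofs are below) =====
def Claim_equal_fast_mul : Prop := ∀ (a : Int) (b : Int) (s : Option Int), Dom_fast_mul a b s → Pre_fast_mul a b s → Spec_fast_mul a b s (fast_mul a b s)

-- ===== LEMMAS AND PROOFS =====

theorem fastMulLoopA_eq (s a : Int) (b : Nat) : fastMulLoopA s a b = s + a * b := by
  induction b using Nat.strong_induction_on generalizing s a with
  | _ b ih =>
    rw [fastMulLoopA]
    by_cases hb : b = 0
    · simp [hb]
    · simp only [hb, if_false]
      rw [ih (b / 2) (Nat.div_lt_self (Nat.pos_of_ne_zero hb) (by norm_num))]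
      have hi : (b : Int) = 2 * ((b / 2 : Nat) : Int) + ((b % 2 : Nat) : Int) := by omega
      rcases Nat.mod_two_eq_zero_or_one b with hm | hm <;>
        simp only [hm] <;> rw [hi, hm] <;> push_cast <;> ring

-- ===== VERDICT (by name: the statement is the Claim_ definition above) =====
theorem fast_mul_spec : Claim_equal_fast_mul := by
  intro a b s _ _
  unfold Spec_fast_mul fast_mul fast_mul_alt
  by_cases hb : b < 0 <;> simp only [hb, if_true, if_false] <;> rw [fastMulLoopA_eq]
  · have : ((-b).toNat : Int) = -b := by omega
    rw [this]; ring
  · have : (b.toNat : Int) = b := by omega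
    rw [this]
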